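-- pv_equiv track=rewrite | github.com/elf-runo/ahecn-streamlit-mvp | app.py | create_funnel_analysis
-- ===== SOURCE A (Python) =====
-- def create_funnel_analysis(referrals):
--     """Create funnel analysis from referral to handover"""
--     if not referrals:
--         return {}
--
--     stages = {
--         'Referrals': len(referrals),
--         'Dispatched': len([r for r in referrals if r['times'].get('dispatch_ts')]),
--         'Arrived': len([r for r in referrals if r['times'].get('arrive_dest_ts')]),
--         'Handover': len([r for r in referrals if r['times'].get('handover_ts')])
--     }
--     return stages
-- ===== SOURCE B (Python) =====
-- _STAGE_KEYS = (('Dispatched', 'dispatch_ts'),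
--                ('Arrived', 'arrive_dest_ts'),
--                ('Handover', 'handover_ts'))
--
--
-- def _stage_events(referrals):
--     """Flatten the referrals into a stream of stage-name events: every record
--     emits 'Referrals', plus one event per stage whose timestamp is truthy."""
--     events = []
--     for r in referrals:
--         events.append('Referrals')
--         t = r['times']
--         for name, key in _STAGE_KEYS:
--             if t.get(key):
--                 events.append(name)
--     return events
--
--
-- def create_funnel_analysis(referrals):
--     """Create funnel analysis from referral to handover"""
--     if not referrals:
--         return {}
--     counts = {'Referrals': 0, 'Dispatched': 0, 'Arrived': 0, 'Handover': 0}
--     for ev in _stage_events(referrals):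
--         counts[ev] += 1
--     return counts
-- ===== Notes on version B (the rewrite author's own statement) =====
-- stated objective: alternative
-- what changed: Instead of filtering the referral list once per stage, B flattens the referrals into a stream of stage-name events (one 'Referrals' event per record plus one event per truthy timestamp, driven by a stage/key table) and then tallies that stream into a pre-keyed counts dict.
import Mathlib
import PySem

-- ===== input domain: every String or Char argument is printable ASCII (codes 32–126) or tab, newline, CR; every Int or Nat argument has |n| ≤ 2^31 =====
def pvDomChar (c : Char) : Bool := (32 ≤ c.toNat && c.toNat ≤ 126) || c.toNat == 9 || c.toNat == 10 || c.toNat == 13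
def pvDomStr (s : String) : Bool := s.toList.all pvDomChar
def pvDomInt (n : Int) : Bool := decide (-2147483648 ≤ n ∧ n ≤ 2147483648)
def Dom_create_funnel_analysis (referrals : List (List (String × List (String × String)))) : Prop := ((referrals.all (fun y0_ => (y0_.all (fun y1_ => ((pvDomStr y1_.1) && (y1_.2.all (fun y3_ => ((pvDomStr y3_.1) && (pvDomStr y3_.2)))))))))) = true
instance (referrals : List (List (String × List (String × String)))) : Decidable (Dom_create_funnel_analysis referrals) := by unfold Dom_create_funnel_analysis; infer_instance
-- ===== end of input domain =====

-- B flattens the referrals into a stream of stage-name events (table-driven) and tallies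
-- the stream into a pre-keyed counts dict, instead of A's len + three filtering scans.

-- t.get(k) truthy: key present with a non-empty string value
def pvTruthyGet (t : List (String × String)) (k : String) : Bool :=
  match (PySem.Dict.mk t).get? k with
  | some s => s != ""
  | none => false

-- r['times']; the missing-key KeyError is excluded by Pre_, so getD [] is unreachable inside Pre_
def pvTimes (r : List (String × List (String × String))) : List (String × String) :=
  ((PySem.Dict.mk r).get? "times").getD []

-- ===== PORT A =====
def create_funnel_analysis (referrals : List (List (String × List (String × String)))) : List (String × Int) :=
  if referrals = [] then []
  else
    [("Referrals", (referrals.length : Int)),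
     ("Dispatched", ((referrals.filter (fun r => pvTruthyGet (pvTimes r) "dispatch_ts")).length : Int)),
     ("Arrived", ((referrals.filter (fun r => pvTruthyGet (pvTimes r) "arrive_dest_ts")).length : Int)),
     ("Handover", ((referrals.filter (fun r => pvTruthyGet (pvTimes r) "handover_ts")).length : Int))]

-- ===== PORT B =====
def pvStageKeys : List (String × String) :=
  [("Dispatched", "dispatch_ts"), ("Arrived", "arrive_dest_ts"), ("Handover", "handover_ts")]

-- _stage_events: the two nested append loops, as folds over the same state
def pvStageEvents (referrals : List (List (String × List (String × String)))) : List String :=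
  referrals.foldl (fun events r =>
    let events := events ++ ["Referrals"]
    let t := pvTimes r
    pvStageKeys.foldl (fun es nk => if pvTruthyGet t nk.2 then es ++ [nk.1] else es) events) []

def create_funnel_analysis_alt (referrals : List (List (String × List (String × String)))) : List (String × Int) :=
  if referrals = [] then []
  else
    -- counts[ev] += 1: every event name is already a key of counts, so modify with default 0 is exact
    let counts := (pvStageEvents referrals).foldl (fun d e => d.modify e 0 (· + 1))
      (PySem.Dict.mk [("Referrals", (0 : Int)), ("Dispatched", 0), ("Arrived", 0), ("Handover", 0)])
    counts.items

-- ===== PRECONDITION & SPEC =====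
-- Pre_ excludes exactly the referral records missing the 'times' key, on which A (and B) raise KeyError.
def Pre_create_funnel_analysis (referrals : List (List (String × List (String × String)))) : Prop :=
  ∀ r ∈ referrals, (PySem.Dict.mk r).contains "times" = true
instance (referrals : List (List (String × List (String × String)))) : Decidable (Pre_create_funnel_analysis referrals) := by unfold Pre_create_funnel_analysis; infer_instance

def pvWitness_create_funnel_analysis : (List (List (String × List (String × String)))) :=
  [[("times", [("dispatch_ts", "2024-01-01")])], [("times", [])]]

def Spec_create_funnel_analysis (referrals : List (List (String × List (String × String)))) (out : List (String × Int)) : Prop := out = create_funnel_analysis_alt referrals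
instance (referrals : List (List (String × List (String × String)))) (out : List (String × Int)) : Decidable (Spec_create_funnel_analysis referrals out) := by unfold Spec_create_funnel_analysis; infer_instance

-- ===== CLAIM (what is proved, stated in full; the proofs are below) =====
def Claim_equal_create_funnel_analysis : Prop := ∀ (referrals : List (List (String × List (String × String)))), Dom_create_funnel_analysis referrals → Pre_create_funnel_analysis referrals → Spec_create_funnel_analysis referrals (create_funnel_analysis referrals)

-- ===== LEMMAS AND PROOFS =====

-- the events one record contributes
def pvPerRec (r : List (String × List (String × String))) : List String :=
  "Referrals" ::
    ((if pvTruthyGet (pvTimes r) "dispatch_ts" then ["Dispatched"] else []) ++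
     (if pvTruthyGet (pvTimes r) "arrive_dest_ts" then ["Arrived"] else []) ++
     (if pvTruthyGet (pvTimes r) "handover_ts" then ["Handover"] else []))

lemma pvStageEvents_eq_flatMap (referrals : List (List (String × List (String × String)))) :
    pvStageEvents referrals = referrals.flatMap pvPerRec := by
  have h : ∀ (acc : List String) (xs : List (List (String × List (String × String)))), xs.foldl (fun events r =>
      let events := events ++ ["Referrals"]
      let t := pvTimes r
      pvStageKeys.foldl (fun es nk => if pvTruthyGet t nk.2 then es ++ [nk.1] else es) events) acc
      = acc ++ xs.flatMap pvPerRec := by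
    intro acc xs
    induction xs generalizing acc with
    | nil => simp
    | cons x xs ih =>
      rw [List.foldl_cons, ih, List.flatMap_cons]
      simp only [pvStageKeys, List.foldl, pvPerRec]
      split_ifs <;> simp
  exact h [] referrals

-- one tally step on the concrete four-key dict
def pvQ (a b c h : Int) : PySem.Dict String Int :=
  PySem.Dict.mk [("Referrals", a), ("Dispatched", b), ("Arrived", c), ("Handover", h)]

lemma pvQ_modify (e : String)
    (he : e = "Referrals" ∨ e = "Dispatched" ∨ e = "Arrived" ∨ e = "Handover")
    (a b c h : Int) :
    (pvQ a b c h).modify e 0 (· + 1) =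
      (if e = "Referrals" then pvQ (a + 1) b c h else
       if e = "Dispatched" then pvQ a (b + 1) c h else
       if e = "Arrived" then pvQ a b (c + 1) h else pvQ a b c (h + 1)) := by
  rcases he with rfl | rfl | rfl | rfl <;>
    simp [pvQ, PySem.Dict.modify, PySem.Dict.insert, PySem.Dict.getD, PySem.Dict.get?,
      PySem.Dict.contains]

lemma pvTally (xs : List String) (a b c h : Int)
    (hx : ∀ e ∈ xs, e = "Referrals" ∨ e = "Dispatched" ∨ e = "Arrived" ∨ e = "Handover") :
    xs.foldl (fun d e => d.modify e 0 (· + 1)) (pvQ a b c h) =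
      pvQ (a + xs.count "Referrals") (b + xs.count "Dispatched")
          (c + xs.count "Arrived") (h + xs.count "Handover") := by
  induction xs generalizing a b c h with
  | nil => simp
  | cons x xs ih =>
    have hx' : ∀ e ∈ xs, e = "Referrals" ∨ e = "Dispatched" ∨ e = "Arrived" ∨ e = "Handover" :=
      fun e he => hx e (List.mem_cons_of_mem _ he)
    have hx0 := hx x (List.mem_cons_self ..)
    rw [List.foldl_cons, pvQ_modify x hx0]
    rcases hx0 with rfl | rfl | rfl | rfl <;>
      [rw [if_pos rfl, ih _ _ _ _ hx'];
       rw [if_neg (by decide), if_pos rfl, ih _ _ _ _ hx'];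
       rw [if_neg (by decide), if_neg (by decide), if_pos rfl, ih _ _ _ _ hx'];
       rw [if_neg (by decide), if_neg (by decide), if_neg (by decide), ih _ _ _ _ hx']] <;>
      simp [pvQ] <;> omega

lemma pvEvents_names (referrals : List (List (String × List (String × String)))) :
    ∀ e ∈ referrals.flatMap pvPerRec,
      e = "Referrals" ∨ e = "Dispatched" ∨ e = "Arrived" ∨ e = "Handover" := by
  intro e he
  obtain ⟨r, _, hr⟩ := List.mem_flatMap.mp he
  simp only [pvPerRec] at hr
  split_ifs at hr <;> simp_all <;> tauto

lemma pvCount_events (xs : List (List (String × List (String × String)))) :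
    (xs.flatMap pvPerRec).count "Referrals" = xs.length ∧
    (xs.flatMap pvPerRec).count "Dispatched" =
      (xs.filter (fun r => pvTruthyGet (pvTimes r) "dispatch_ts")).length ∧
    (xs.flatMap pvPerRec).count "Arrived" =
      (xs.filter (fun r => pvTruthyGet (pvTimes r) "arrive_dest_ts")).length ∧
    (xs.flatMap pvPerRec).count "Handover" =
      (xs.filter (fun r => pvTruthyGet (pvTimes r) "handover_ts")).length := by
  induction xs with
  | nil => simp
  | cons x xs ih =>
    obtain ⟨i1, i2, i3, i4⟩ := ih
    simp only [List.flatMap_cons, List.count_append, List.filter_cons, pvPerRec,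
      List.length_cons]
    split_ifs <;> simp [i1, i2, i3, i4] <;> omega

-- ===== VERDICT (by name: the statement is the Claim_ definition above) =====
theorem create_funnel_analysis_spec : Claim_equal_create_funnel_analysis := by
  intro referrals _ _
  unfold Spec_create_funnel_analysis create_funnel_analysis create_funnel_analysis_alt
  by_cases hE : referrals = []
  · simp [hE]
  · simp only [hE, if_false]
    rw [pvStageEvents_eq_flatMap,
      show (PySem.Dict.mk [("Referrals", (0 : Int)), ("Dispatched", 0), ("Arrived", 0), ("Handover", 0)]) = pvQ 0 0 0 0 from rfl,
      pvTally _ _ _ _ _ (pvEvents_names referrals)]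
    obtain ⟨i1, i2, i3, i4⟩ := pvCount_events referrals
    simp [pvQ, i1, i2, i3, i4]
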